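-- pv_equiv track=rewrite | github.com/yuribak/aoc | 2022/8.py | vscores
-- ===== SOURCE A (Python) =====
-- def vscores(vec):
--
--     blocks = {}
--     score = [0] * len(vec)
--     for i in range(1, len(vec)):
--         if vec[i - 1] >= vec[i]:
--             blocks[i] = i - 1
--             score[i] = 1
--         else:
--             j = blocks.get(i - 1)
--             while j is not None and vec[j] < vec[i]:
--                 j = blocks.get(j)
--             blocks[i] = j
--             score[i] = i - (0 if j is None else j)
--     return score
-- ===== SOURCE B (Python) =====
-- def vscores(vec):
--     # Monotonic stack of indices whose heights are non-increasing from bottom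
--     # to top: pop everything shorter than the current tree, and the new top (or
--     # the edge, index 0) is what blocks the view.
--     score = [0] * len(vec)
--     stack = []
--     for i in range(len(vec)):
--         while stack and vec[stack[-1]] < vec[i]:
--             stack.pop()
--         score[i] = i - (stack[-1] if stack else 0)
--         stack.append(i)
--     return score
-- ===== Notes on version B (the rewrite author's own statement) =====
-- stated objective: alternative
-- what changed: Replaces A's dict of memoized nearest-blocker pointers (chains followed via blocks.get, entries never removed, plus a special adjacent-tree branch) with a single uniform pass over a monotonic stack of indices that destructively pops shorter trees.
import Mathlib
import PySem

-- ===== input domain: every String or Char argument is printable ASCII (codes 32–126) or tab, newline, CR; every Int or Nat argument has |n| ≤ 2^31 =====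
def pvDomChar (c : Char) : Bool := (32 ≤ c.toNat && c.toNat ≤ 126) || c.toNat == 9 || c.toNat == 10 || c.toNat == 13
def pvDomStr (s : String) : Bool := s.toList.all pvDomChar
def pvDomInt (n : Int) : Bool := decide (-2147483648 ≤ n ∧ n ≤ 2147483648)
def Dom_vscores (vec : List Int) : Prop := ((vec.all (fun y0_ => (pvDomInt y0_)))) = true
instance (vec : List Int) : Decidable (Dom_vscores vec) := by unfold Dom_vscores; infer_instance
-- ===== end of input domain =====

-- B replaces A's memoized nearest-blocker pointer dict (chains chased via blocks.get,
-- plus a special adjacent-tree branch) with a single uniform monotonic-stack pass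
-- (objective: alternative); return values agree on every input.

-- ===== PORT A =====
-- vec[i]; every index actually read by either program is in range, so the default 0 is never used
def vGet (vec : List Int) (i : Int) : Int := (PySem.List.pyGet? vec i).getD 0

-- the inner `while j is not None and vec[j] < vec[i]: j = blocks.get(j)` loop of A;
-- fuel only makes the chase total (the pointer chain strictly decreases, so fuel = len(vec) is never exhausted)
def aChase (vec : List Int) (blocks : PySem.Dict Int (Option Int)) (x : Int) : Option Int → Nat → Option Int
  | j, 0 => j
  | none, _ + 1 => none
  | some jj, fuel + 1 =>
      if vGet vec jj < x then aChase vec blocks x ((blocks.get? jj).join) fuel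
      else some jj

-- loop body of A's `for i in range(1, len(vec))`
def vscoresStep (vec : List Int) (st : PySem.Dict Int (Option Int) × List Int) (i : Int) :
    PySem.Dict Int (Option Int) × List Int :=
  let (blocks, score) := st
  if vGet vec (i - 1) ≥ vGet vec i then
    (blocks.insert i (some (i - 1)), score.set i.toNat 1)
  else
    let j := aChase vec blocks (vGet vec i) ((blocks.get? (i - 1)).join) vec.length
    (blocks.insert i j, score.set i.toNat (i - j.getD 0))

def vscores (vec : List Int) : List Int :=
  ((PySem.List.pyRange 1 vec.length 1).foldl (vscoresStep vec)
    (PySem.Dict.empty, List.replicate vec.length 0)).2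

-- ===== PORT B =====
-- B's inner `while stack and vec[stack[-1]] < vec[i]: stack.pop()`
-- (the stack is a Lean list with its TOP at the head: append = cons, stack[-1] = head)
def popWhile (vec : List Int) (x : Int) : List Int → List Int
  | [] => []
  | t :: rest => if vGet vec t < x then popWhile vec x rest else t :: rest

-- loop body of B's `for i in range(len(vec))`
def altStep (vec : List Int) (st : List Int × List Int) (i : Int) : List Int × List Int :=
  let (stack, score) := st
  let stack' := popWhile vec (vGet vec i) stack
  (i :: stack', score.set i.toNat (i - (match stack' with | [] => 0 | t :: _ => t)))

def vscores_alt (vec : List Int) : List Int :=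
  ((PySem.List.pyRange 0 vec.length 1).foldl (altStep vec)
    ([], List.replicate vec.length 0)).2

-- ===== PRECONDITION & SPEC =====
def Spec_vscores (vec : List Int) (out : List Int) : Prop := out = vscores_alt vec
instance (vec : List Int) (out : List Int) : Decidable (Spec_vscores vec out) := by unfold Spec_vscores; infer_instance

-- ===== CLAIM (what is proved, stated in full; the proofs are below) =====
def Claim_equal_vscores : Prop := ∀ (vec : List Int), Dom_vscores vec → Spec_vscores vec (vscores vec)

-- ===== LEMMAS AND PROOFS =====

-- proof layer: backward scan from j for the nearest index with height ≥ x (-1 if none)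
def bScan (vec : List Int) (x : Int) (j : Int) : Int :=
  if h : 0 ≤ j ∧ vGet vec j < x then bScan vec x (j - 1) else j
termination_by (j + 1).toNat
decreasing_by omega

theorem bScan_eq (vec : List Int) (x j : Int) :
    bScan vec x j = if 0 ≤ j ∧ vGet vec j < x then bScan vec x (j - 1) else j := by
  rw [bScan]; split <;> simp_all

theorem bScan_bounds (vec : List Int) (x : Int) :
    ∀ (k : Nat) (j : Int), (j + 1).toNat = k → -1 ≤ j →
      -1 ≤ bScan vec x j ∧ bScan vec x j ≤ j := by
  intro k
  induction k with
  | zero =>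
    intro j hk hj
    have : j = -1 := by omega
    subst this
    rw [bScan_eq]; simp
  | succ k ih =>
    intro j hk hj
    rw [bScan_eq]
    by_cases hc : 0 ≤ j ∧ vGet vec j < x
    · simp only [hc]
      have := ih (j - 1) (by omega) (by omega)
      exact ⟨this.1, by omega⟩
    · simp only [hc, if_false]; omega

theorem bScan_scanned (vec : List Int) (x : Int) :
    ∀ (c : Nat) (j : Int), (j + 1).toNat = c → -1 ≤ j →
      ∀ k, bScan vec x j < k → k ≤ j → vGet vec k < x := by
  intro c
  induction c with
  | zero =>
    intro j hc hj k h1 h2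
    have : j = -1 := by omega
    subst this
    rw [bScan_eq] at h1
    simp at h1
    omega
  | succ c ih =>
    intro j hc hj k h1 h2
    rw [bScan_eq] at h1
    by_cases hcnd : 0 ≤ j ∧ vGet vec j < x
    · simp only [hcnd] at h1
      by_cases hk : k = j
      · subst hk; exact hcnd.2
      · exact ih (j - 1) (by omega) (by omega) k h1 (by omega)
    · simp only [hcnd, if_false] at h1; omega

-- skipping a block of elements all < x does not change the scan result
theorem bScan_congr (vec : List Int) (x : Int) :
    ∀ (c : Nat) (t b : Int), (t - b).toNat = c → -1 ≤ b → b ≤ t →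
      (∀ k, b < k → k ≤ t → vGet vec k < x) → bScan vec x t = bScan vec x b := by
  intro c
  induction c with
  | zero =>
    intro t b hc hb hbt _
    have : t = b := by omega
    rw [this]
  | succ c ih =>
    intro t b hc hb hbt hall
    have ht : t ≠ b := by omega
    have h0t : 0 ≤ t := by omega
    rw [bScan_eq]
    simp only [h0t, hall t (by omega) le_rfl, and_self, if_true]
    exact ih (t - 1) b (by omega) hb (by omega) (fun k h1 h2 => hall k h1 (by omega))

def optOf (c : Int) : Option Int := if 0 ≤ c then some c else none

def gB (vec : List Int) (i : Int) : Int := bScan vec (vGet vec i) (i - 1)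

def altval (vec : List Int) (i : Int) : Int :=
  if 0 ≤ gB vec i then i - gB vec i else i

theorem chase_eq (vec : List Int) (blocks : PySem.Dict Int (Option Int)) (x : Int) (m : Int)
    (hb : ∀ k : Int, 1 ≤ k → k < m → (blocks.get? k).join = optOf (gB vec k))
    (h0 : blocks.get? 0 = none) :
    ∀ (fuel : Nat) (c : Int), -1 ≤ c → c < m → (c + 1).toNat ≤ fuel →
      aChase vec blocks x (optOf c) fuel = optOf (bScan vec x c) := by
  intro fuel
  induction fuel with
  | zero =>
    intro c hc hcm hf
    have : c = -1 := by omega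
    subst this
    rw [bScan_eq]
    simp [optOf, aChase]
  | succ fuel ih =>
    intro c hc hcm hf
    by_cases hc0 : 0 ≤ c
    · have hoc : optOf c = some c := by simp [optOf, hc0]
      rw [hoc]
      by_cases hv : vGet vec c < x
      · have hstep : aChase vec blocks x (some c) (fuel + 1)
            = aChase vec blocks x ((blocks.get? c).join) fuel := by
          simp [aChase, hv]
        rw [hstep]
        have hcb := bScan_bounds vec (vGet vec c) (c - 1 + 1).toNat (c - 1) rfl (by omega)
        have hjoin : (blocks.get? c).join = optOf (gB vec c) := by
          by_cases hcz : c = 0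
          · subst hcz
            rw [h0]
            have : gB vec 0 = -1 := by
              unfold gB
              rw [bScan_eq]; simp
            rw [this]
            simp [optOf]
          · exact hb c (by omega) hcm
        rw [hjoin]
        have hc' : gB vec c ≤ c - 1 ∧ -1 ≤ gB vec c := ⟨hcb.2, hcb.1⟩
        rw [ih (gB vec c) hc'.2 (by omega) (by omega)]
        have hcc : bScan vec x c = bScan vec x (gB vec c) := by
          rw [bScan_eq]
          simp only [hc0, hv, and_self, if_true]
          exact bScan_congr vec x (c - 1 - gB vec c).toNat (c - 1) (gB vec c) rfl hc'.2 (by omega)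
            (fun k h1 h2 => lt_trans
              (bScan_scanned vec (vGet vec c) (c - 1 + 1).toNat (c - 1) rfl (by omega) k h1 h2) hv)
        rw [hcc]
      · have : aChase vec blocks x (some c) (fuel + 1) = some c := by
          simp [aChase, hv]
        rw [this, bScan_eq]
        simp [hc0, hv, optOf]
    · have : c = -1 := by omega
      subst this
      rw [bScan_eq]
      simp [optOf, aChase]

def LoopInv (vec : List Int) (m : Int) (st : PySem.Dict Int (Option Int) × List Int) : Prop :=
  (∀ k : Int, 1 ≤ k → k < m → (st.1.get? k).join = optOf (gB vec k)) ∧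
  st.1.get? 0 = none ∧
  st.2 = (List.range vec.length).map (fun t : Nat => if (t : Int) < m then altval vec t else 0)

theorem score_set_lemma (vec : List Int) (m : Int) (h1 : 0 ≤ m) (_h2 : m < (vec.length : Int))
    (v : Int) (hv : v = altval vec m) :
    ((List.range vec.length).map (fun t : Nat => if (t : Int) < m then altval vec t else 0)).set m.toNat v
      = (List.range vec.length).map (fun t : Nat => if (t : Int) < m + 1 then altval vec t else 0) := by
  apply List.ext_getElem
  · simp
  · intro k hk1 hk2
    simp only [List.length_map, List.length_range] at hk2
    simp only [List.getElem_set, List.getElem_map, List.getElem_range]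
    by_cases hkm : m.toNat = k
    · have hck : (k : Int) = m := by omega
      simp [hkm, hv, hck, show m < m + 1 by omega]
    · simp only [hkm, if_false]
      by_cases hlt : (k : Int) < m
      · simp [hlt, show (k : Int) < m + 1 by omega]
      · simp [hlt, show ¬ (k : Int) < m + 1 by omega]

theorem inv_step (vec : List Int) (m : Int) (st : PySem.Dict Int (Option Int) × List Int)
    (h : LoopInv vec m st) (h1 : 1 ≤ m) (h2 : m < (vec.length : Int)) :
    LoopInv vec (m + 1) (vscoresStep vec st m) := by
  obtain ⟨blocks, score⟩ := st
  obtain ⟨hb, h0, hs⟩ := h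
  simp only at hb h0 hs
  by_cases hge : vGet vec (m - 1) ≥ vGet vec m
  · have hg : gB vec m = m - 1 := by
      unfold gB
      rw [bScan_eq]
      simp [show ¬ vGet vec (m - 1) < vGet vec m by omega]
    have hstep : vscoresStep vec (blocks, score) m
        = (blocks.insert m (some (m - 1)), score.set m.toNat 1) := by
      simp [vscoresStep, hge]
    rw [hstep]
    unfold LoopInv
    dsimp only
    refine ⟨?_, ?_, ?_⟩
    · intro k hk1 hk2
      by_cases hkm : k = m
      · subst hkm
        rw [PySem.Dict.get?_insert_self]
        simp only [Option.join_some, hg, optOf]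
        rw [if_pos (by omega)]
      · rw [PySem.Dict.get?_insert_of_ne _ _ hkm]
        exact hb k hk1 (by omega)
    · rw [PySem.Dict.get?_insert_of_ne _ _ (by omega : (0:Int) ≠ m)]
      exact h0
    · rw [hs]
      exact score_set_lemma vec m (by omega) h2 1 (by unfold altval; rw [hg]; split_ifs <;> omega)
  · have hlt : vGet vec (m - 1) < vGet vec m := by omega
    have hcb := bScan_bounds vec (vGet vec (m - 1)) (m - 2 + 1).toNat (m - 2) rfl (by omega)
    have hgb1 : gB vec (m - 1) = bScan vec (vGet vec (m - 1)) (m - 2) := by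
      unfold gB
      congr 1
      omega
    have hcb' : -1 ≤ gB vec (m - 1) ∧ gB vec (m - 1) ≤ m - 2 := by
      rw [hgb1]; exact hcb
    have hjoin : (blocks.get? (m - 1)).join = optOf (gB vec (m - 1)) := by
      by_cases hm1 : m = 1
      · subst hm1
        rw [show (1:Int) - 1 = 0 by norm_num, h0]
        have : gB vec 0 = -1 := by
          unfold gB
          rw [bScan_eq]; simp
        rw [this]; simp [optOf]
      · exact hb (m - 1) (by omega) (by omega)
    have hchase : aChase vec blocks (vGet vec m) ((blocks.get? (m - 1)).join) vec.length
        = optOf (gB vec m) := by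
      rw [hjoin]
      rw [chase_eq vec blocks (vGet vec m) m hb h0 vec.length (gB vec (m - 1))
        hcb'.1 (by omega) (by omega)]
      have key : bScan vec (vGet vec m) (m - 1) = bScan vec (vGet vec m) (gB vec (m - 1)) := by
        rw [bScan_eq, if_pos ⟨by omega, hlt⟩]
        exact bScan_congr vec (vGet vec m) (m - 1 - 1 - gB vec (m - 1)).toNat (m - 1 - 1)
          (gB vec (m - 1)) rfl hcb'.1 (by omega)
          (fun k hk1 hk2 => lt_trans
            (bScan_scanned vec (vGet vec (m - 1)) (m - 2 + 1).toNat (m - 2) rfl (by omega) k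
              (by omega) (by omega)) hlt)
      congr 1
      rw [show gB vec m = bScan vec (vGet vec m) (m - 1) from rfl]
      exact key.symm
    have hstep : vscoresStep vec (blocks, score) m
        = (blocks.insert m (optOf (gB vec m)),
           score.set m.toNat (m - (optOf (gB vec m)).getD 0)) := by
      simp only [vscoresStep, if_neg (by omega : ¬ vGet vec (m - 1) ≥ vGet vec m)]
      rw [hchase]
    rw [hstep]
    unfold LoopInv
    dsimp only
    refine ⟨?_, ?_, ?_⟩
    · intro k hk1 hk2
      by_cases hkm : k = m
      · subst hkm
        rw [PySem.Dict.get?_insert_self]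
        by_cases hgpos : 0 ≤ gB vec k
        · simp [optOf, hgpos]
        · simp [optOf, hgpos]
      · rw [PySem.Dict.get?_insert_of_ne _ _ hkm]
        exact hb k hk1 (by omega)
    · rw [PySem.Dict.get?_insert_of_ne _ _ (by omega : (0:Int) ≠ m)]
      exact h0
    · rw [hs]
      refine score_set_lemma vec m (by omega) h2 _ ?_
      by_cases hgpos : 0 ≤ gB vec m
      · simp [optOf, hgpos, altval]
      · simp [optOf, hgpos, altval]

theorem altval_zero (vec : List Int) : altval vec 0 = 0 := by
  unfold altval gB
  rw [bScan_eq]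
  simp

theorem inv_holds (vec : List Int) :
    ∀ d : Nat, 1 + (d : Int) ≤ (vec.length : Int) →
      LoopInv vec (1 + d) ((PySem.List.pyRange 1 (1 + (d : Int)) 1).foldl (vscoresStep vec)
        (PySem.Dict.empty, List.replicate vec.length 0)) := by
  intro d
  induction d with
  | zero =>
    intro _
    rw [show (1 + ((0 : Nat) : Int)) = 1 by norm_num, PySem.List.pyRange_one_eq_nil le_rfl]
    refine ⟨fun k hk1 hk2 => absurd hk2 (by omega), by simp [PySem.Dict.empty, PySem.Dict.get?], ?_⟩
    simp only [List.foldl_nil]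
    apply List.ext_getElem
    · simp
    · intro k hk1 hk2
      simp only [List.getElem_replicate, List.getElem_map, List.getElem_range]
      by_cases hk : (k : Int) < 1
      · have : k = 0 := by omega
        subst this
        simp [altval_zero]
      · simp [hk]
  | succ d ih =>
    intro hle
    have hc : (1 + ((d + 1 : Nat) : Int)) = (1 + (d : Int)) + 1 := by push_cast; ring
    rw [hc, PySem.List.pyRange_one_succ_right (by omega), List.foldl_append, List.foldl_cons,
      List.foldl_nil]
    exact inv_step vec (1 + d) _ (ih (by omega)) (by omega) (by omega)

-- proof layer: the chain of successive nearest-≥ indices starting at c (B's stack contents)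
def chain (vec : List Int) (c : Int) : List Int :=
  if _h : 0 ≤ c then c :: chain vec (gB vec c) else []
termination_by (c + 1).toNat
decreasing_by
  have := bScan_bounds vec (vGet vec c) (c - 1 + 1).toNat (c - 1) rfl (by omega)
  unfold gB
  omega

theorem chain_neg (vec : List Int) (c : Int) (h : c < 0) : chain vec c = [] := by
  rw [chain]
  simp [show ¬ 0 ≤ c by omega]

theorem chain_nonneg (vec : List Int) (c : Int) (h : 0 ≤ c) :
    chain vec c = c :: chain vec (gB vec c) := by
  rw [chain]
  simp [h]

theorem popWhile_chain (vec : List Int) (x : Int) :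
    ∀ (f : Nat) (c : Int), -1 ≤ c → (c + 1).toNat ≤ f →
      popWhile vec x (chain vec c) = chain vec (bScan vec x c) := by
  intro f
  induction f with
  | zero =>
    intro c hc hf
    have : c = -1 := by omega
    subst this
    rw [bScan_eq]
    simp [chain_neg, popWhile]
  | succ f ih =>
    intro c hc hf
    by_cases hc0 : 0 ≤ c
    · rw [chain_nonneg vec c hc0]
      have hcb := bScan_bounds vec (vGet vec c) (c - 1 + 1).toNat (c - 1) rfl (by omega)
      by_cases hv : vGet vec c < x
      · have hpop : popWhile vec x (c :: chain vec (gB vec c))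
            = popWhile vec x (chain vec (gB vec c)) := by
          simp [popWhile, hv]
        rw [hpop, ih (gB vec c) hcb.1 (by unfold gB; omega)]
        have key : bScan vec x c = bScan vec x (gB vec c) := by
          rw [bScan_eq, if_pos ⟨hc0, hv⟩]
          exact bScan_congr vec x (c - 1 - gB vec c).toNat (c - 1) (gB vec c) rfl hcb.1
            (by unfold gB; omega)
            (fun k hk1 hk2 => lt_trans
              (bScan_scanned vec (vGet vec c) (c - 1 + 1).toNat (c - 1) rfl (by omega) k
                (by unfold gB at hk1; omega) hk2) hv)
        rw [key]
      · have hpop : popWhile vec x (c :: chain vec (gB vec c)) = c :: chain vec (gB vec c) := by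
          simp [popWhile, hv]
        rw [hpop, bScan_eq, if_neg (by omega)]
        exact (chain_nonneg vec c hc0).symm
    · have : c = -1 := by omega
      subst this
      rw [bScan_eq]
      simp [chain_neg, popWhile]

def LoopInv2 (vec : List Int) (m : Int) (st : List Int × List Int) : Prop :=
  st.1 = chain vec (m - 1) ∧
  st.2 = (List.range vec.length).map (fun t : Nat => if (t : Int) < m then altval vec t else 0)

theorem inv2_step (vec : List Int) (m : Int) (st : List Int × List Int)
    (h : LoopInv2 vec m st) (h1 : 0 ≤ m) (h2 : m < (vec.length : Int)) :
    LoopInv2 vec (m + 1) (altStep vec st m) := by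
  obtain ⟨blocks, score⟩ := st
  obtain ⟨hstk, hs⟩ := h
  simp only at hstk hs
  have hcb := bScan_bounds vec (vGet vec m) (m - 1 + 1).toNat (m - 1) rfl (by omega)
  have hpop : popWhile vec (vGet vec m) (chain vec (m - 1)) = chain vec (gB vec m) := by
    exact popWhile_chain vec (vGet vec m) (m - 1 + 1).toNat (m - 1) (by omega) le_rfl
  have hval : (m - (match chain vec (gB vec m) with | [] => (0:Int) | t :: _ => t))
      = altval vec m := by
    by_cases hg : 0 ≤ gB vec m
    · rw [chain_nonneg vec _ hg]
      simp [altval, hg]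
    · rw [chain_neg vec _ (by omega)]
      simp [altval, hg]
  unfold altStep LoopInv2
  dsimp only
  rw [hstk, hpop]
  refine ⟨?_, ?_⟩
  · rw [show m + 1 - 1 = m by ring, chain_nonneg vec m h1]
  · rw [hval, hs]
    exact score_set_lemma vec m h1 h2 _ rfl

theorem inv2_holds (vec : List Int) :
    ∀ d : Nat, (d : Int) ≤ (vec.length : Int) →
      LoopInv2 vec d ((PySem.List.pyRange 0 (d : Int) 1).foldl (altStep vec)
        ([], List.replicate vec.length 0)) := by
  intro d
  induction d with
  | zero =>
    intro _
    rw [show ((0 : Nat) : Int) = 0 by norm_num, PySem.List.pyRange_one_eq_nil le_rfl]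
    refine ⟨by simp [chain_neg], ?_⟩
    simp only [List.foldl_nil]
    apply List.ext_getElem
    · simp
    · intro k hk1 hk2
      simp only [List.getElem_replicate, List.getElem_map, List.getElem_range]
      simp [show ¬ ((k : Int) < 0) by omega]
  | succ d ih =>
    intro hle
    have hc : (((d + 1 : Nat)) : Int) = (d : Int) + 1 := by push_cast; ring
    rw [hc, PySem.List.pyRange_one_succ_right (by omega), List.foldl_append, List.foldl_cons,
      List.foldl_nil]
    exact inv2_step vec d _ (ih (by omega)) (by omega) (by omega)

theorem alt_eq (vec : List Int) :
    vscores_alt vec = (List.range vec.length).map (fun t : Nat => altval vec (t : Int)) := by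
  have hinv := inv2_holds vec vec.length le_rfl
  obtain ⟨-, hsc⟩ := hinv
  unfold vscores_alt
  rw [hsc]
  apply List.map_congr_left
  intro k hk
  have : (k : Int) < (vec.length : Int) := by exact_mod_cast List.mem_range.mp hk
  simp [this]

-- ===== VERDICT (by name: the statement is the Claim_ definition above) =====
theorem vscores_spec : Claim_equal_vscores := by
  intro vec _
  unfold Spec_vscores
  by_cases hnil : vec = []
  · subst hnil
    rfl
  · have hlen : 1 ≤ vec.length := List.length_pos_of_ne_nil hnil
    have hm : (1 + ((vec.length - 1 : Nat) : Int)) = (vec.length : Int) := by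
      push_cast [Nat.cast_sub hlen]
      ring
    have hinv := inv_holds vec (vec.length - 1) (by omega)
    rw [hm] at hinv
    obtain ⟨-, -, hsc⟩ := hinv
    unfold vscores
    rw [hsc, alt_eq]
    apply List.map_congr_left
    intro k hk
    have : (k : Int) < (vec.length : Int) := by exact_mod_cast List.mem_range.mp hk
    simp [this]
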